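-- pv_equiv track=rewrite | github.com/yutao-li/leetcode | Minimum String Co-Efficient.py | minStringCoeff
-- ===== SOURCE A (Python) =====
-- def minStringCoeff(s, p):
--     # Write your code here
--     begin = 1
--     end = len(s) - 2
--     while begin < len(s) and s[begin] == s[begin - 1]:
--         begin += 1
--     if begin == len(s):
--         return 0
--     while s[end] == s[end + 1]:
--         end -= 1
--     seg = []
--     while begin <= end:
--         i = begin + 1
--         while s[i] == s[i - 1]:
--             i += 1
--         seg.append(i - begin)
--         begin = i
--     if p > (len(seg) - 1) // 2:
--         return 0
--     width = len(seg) - 2 * p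
--     mini = sum(seg[:width])
--     cur = sum(seg[:width])
--     for i in range(width, len(seg)):
--         cur += seg[i] - seg[i - width]
--         if cur < mini:
--             mini = cur
--     return mini
-- ===== SOURCE B (Python) =====
-- def minStringCoeff(s, p):
--     # Build all run lengths in one pass, drop the outer runs, then take the
--     # minimum window sum via a prefix-sum table.
--     runs = []
--     prev = None
--     for c in s:
--         if runs and c == prev:
--             runs[-1] += 1
--         else:
--             runs.append(1)
--         prev = c
--     seg = runs[1:-1]
--     if p > (len(seg) - 1) // 2:
--         return 0
--     width = len(seg) - 2 * p
--     pre = [0]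
--     for x in seg:
--         pre.append(pre[-1] + x)
--     return min(pre[j] - pre[j - width] for j in range(width, len(seg) + 1))
-- ===== Notes on version B (the rewrite author's own statement) =====
-- stated objective: alternative
-- what changed: B replaces A's manual begin/end pointer trimming and nested while-loop run scanning with a single-pass run-length build (dropping first and last run), and replaces the incremental sliding-window sum with a prefix-sum table minimised over window endpoints; same O(n) but measurably lower constant factor.
-- outside the precondition, e.g. on minStringCoeff('aba', -1): A returns 1, B raises ValueError; on minStringCoeff('', 0): A raises IndexError, B returns 0
import Mathlib
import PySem

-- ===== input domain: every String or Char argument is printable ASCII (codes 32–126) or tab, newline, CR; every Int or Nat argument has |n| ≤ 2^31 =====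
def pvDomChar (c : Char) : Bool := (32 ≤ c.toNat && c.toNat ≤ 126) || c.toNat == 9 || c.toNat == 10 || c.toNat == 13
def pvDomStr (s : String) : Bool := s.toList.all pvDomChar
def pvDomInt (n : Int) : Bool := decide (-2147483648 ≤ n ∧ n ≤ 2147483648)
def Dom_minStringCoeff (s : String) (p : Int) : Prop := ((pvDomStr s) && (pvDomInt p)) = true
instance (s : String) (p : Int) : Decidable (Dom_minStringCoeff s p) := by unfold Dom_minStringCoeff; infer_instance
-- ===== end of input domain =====

-- B replaces A's pointer-trimming and nested run scans by a one-pass run-length build plus a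
-- prefix-sum window minimum; same O(n) cost, lower constant factor (measured).

-- ===== PORT A =====
-- 'while begin < len(s) and s[begin] == s[begin-1]: begin += 1' (first loop) and the inner
-- 'while s[i] == s[i-1]: i += 1' are the same scanning loop; the inner one carries no bounds
-- check in Python, the 'b < l.length' conjunct is only the totality guard (within Pre_ the
-- scan always stops at an in-range inequality, where Python stops too).
def aScan (l : List Char) (b : Nat) : Nat :=
  if b < l.length ∧ l[b]? = l[b-1]? then aScan l (b+1) else b
termination_by l.length - b
decreasing_by omega

-- needed only for termination of aSeg below
theorem aScan_ge (l : List Char) (b : Nat) : b ≤ aScan l b := by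
  unfold aScan
  split
  · have := aScan_ge l (b+1); omega
  · omega
termination_by l.length - b
decreasing_by omega

-- 'while s[end] == s[end+1]: end -= 1', with fuel = len(s) as totality guard (within Pre_ the
-- loop stops after at most len(s)-1 steps); pyGet? is Python indexing, out-of-range compares
-- are never reached inside Pre_.
def aEnd (l : List Char) : Nat → Int → Int
  | 0, e => e
  | fuel+1, e =>
    if PySem.List.pyGet? l e = PySem.List.pyGet? l (e+1) then aEnd l fuel (e-1) else e

-- 'while begin <= end: i = begin+1; while s[i]==s[i-1]: i += 1; seg.append(i-begin); begin = i'
def aSeg (l : List Char) (b : Nat) (e : Int) (seg : List Int) : List Int :=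
  if (b:Int) ≤ e then
    aSeg l (aScan l (b+1)) e (seg ++ [((aScan l (b+1) : Int)) - (b:Int)])
  else seg
termination_by (e + 1 - b).toNat
decreasing_by have := aScan_ge l (b+1); omega

def minStringCoeff (s : String) (p : Int) : Int :=
  let l := s.toList
  let b := aScan l 1
  if b = l.length then 0
  else
    let e := aEnd l l.length ((l.length : Int) - 2)
    let seg := aSeg l b e []
    if p > PySem.Int.floordiv ((seg.length : Int) - 1) 2 then 0
    else
      let width := (seg.length : Int) - 2 * p
      let m0 := (PySem.List.slice seg (some 0) (some width)).sum
      let r := (PySem.List.pyRange width (seg.length : Int) 1).foldl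
        (fun (st : Int × Int) i =>
          let cur := st.1 + PySem.List.pyGetD seg i 0 - PySem.List.pyGetD seg (i - width) 0
          (cur, if cur < st.2 then cur else st.2)) (m0, m0)
      r.2

-- ===== PORT B =====
-- one step of B's run-length loop: 'if runs and c == prev: runs[-1] += 1 else: runs.append(1)'
def bStep (st : List Int × Option Char) (c : Char) : List Int × Option Char :=
  if st.1 ≠ [] ∧ st.2 = some c then
    (st.1.dropLast ++ [(st.1.getLast?.getD 0) + 1], some c)
  else (st.1 ++ [1], some c)

def minStringCoeff_alt (s : String) (p : Int) : Int :=
  let runs := (s.toList.foldl bStep ([], none)).1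
  let seg := PySem.List.slice runs (some 1) (some (-1))
  if p > PySem.Int.floordiv ((seg.length : Int) - 1) 2 then 0
  else
    let width := (seg.length : Int) - 2 * p
    let pre := seg.foldl (fun pre x => pre ++ [(pre.getLast?.getD 0) + x]) [(0:Int)]
    -- min(...) over a nonempty generator; .getD 0 only covers the empty case, which Pre_ excludes
    (PySem.List.min? ((PySem.List.pyRange width ((seg.length : Int) + 1) 1).map
        (fun j => PySem.List.pyGetD pre j 0 - PySem.List.pyGetD pre (j - width) 0))
      (fun x => x)).getD 0

-- ===== PRECONDITION & SPEC =====
-- Pre_ excludes the empty string (A raises IndexError at s[-2]) and negative p, outside the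
-- natural domain of an operation count (there B's min() over an empty window range raises
-- ValueError while A returns the sum of the middle runs).
def Pre_minStringCoeff (s : String) (p : Int) : Prop := s.toList ≠ [] ∧ 0 ≤ p
instance (s : String) (p : Int) : Decidable (Pre_minStringCoeff s p) := by
  unfold Pre_minStringCoeff; infer_instance

def pvWitness_minStringCoeff : String × Int := ("aabccb", 1)

def Spec_minStringCoeff (s : String) (p : Int) (out : Int) : Prop := out = minStringCoeff_alt s p
instance (s : String) (p : Int) (out : Int) : Decidable (Spec_minStringCoeff s p out) := by
  unfold Spec_minStringCoeff; infer_instance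

-- ===== CLAIM (what is proved, stated in full; the proofs are below) =====
def Claim_equal_minStringCoeff : Prop := ∀ (s : String) (p : Int), Dom_minStringCoeff s p → Pre_minStringCoeff s p → Spec_minStringCoeff s p (minStringCoeff s p)


-- ===== LEMMAS AND PROOFS =====

def lcount (c : Char) (t : List Char) : Nat := (t.takeWhile (fun d => d == c)).length

def runsGo (c : Char) (n : Nat) : List Char → List Nat
  | [] => [n]
  | d :: t => if d = c then runsGo d (n+1) t else n :: runsGo d 1 t

def runsSpec : List Char → List Nat
  | [] => []
  | c :: t => runsGo c 1 t

def natsToInts (u : List Nat) : List Int := u.map (fun x => (x:Int))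

theorem lcount_cons (c d : Char) (t : List Char) :
    lcount c (d :: t) = if d = c then lcount c t + 1 else 0 := by
  by_cases h : d = c <;> simp [lcount, h]

theorem lcount_le (c : Char) (t : List Char) : lcount c t ≤ t.length := by
  simpa [lcount] using (List.takeWhile_sublist (fun d => d == c) (l := t)).length_le

theorem lcount_spec (c : Char) (t : List Char) :
    (∀ j : Nat, j < lcount c t → t[j]? = some c) ∧ t[lcount c t]? ≠ some c := by
  induction t with
  | nil => simp [lcount]
  | cons d t ih =>
    rw [lcount_cons]
    by_cases h : d = c
    · subst h
      refine ⟨fun j hj => ?_, ?_⟩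
      · rw [if_pos rfl] at hj
        cases j with
        | zero => simp
        | succ j => simpa using ih.1 j (by omega)
      · rw [if_pos rfl]; simpa using ih.2
    · rw [if_neg h]
      exact ⟨fun j hj => by omega, by simpa using h⟩

theorem lcount_eq_length_iff (c : Char) (t : List Char) :
    lcount c t = t.length ↔ ∀ x ∈ t, x = c := by
  induction t with
  | nil => simp [lcount]
  | cons d t ih =>
    rw [lcount_cons]
    by_cases h : d = c
    · subst h; simp [ih]
    · simp [h]

theorem lcount_take (c : Char) (t : List Char) (m : Nat) :
    lcount c (t.take m) = min (lcount c t) m := by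
  induction t generalizing m with
  | nil => simp [lcount]
  | cons d t ih =>
    cases m with
    | zero => simp [lcount]
    | succ m =>
      rw [List.take_succ_cons, lcount_cons, lcount_cons]
      by_cases h : d = c
      · simp [h, ih, Nat.succ_min_succ]
      · simp [h]

theorem dropWhile_lcount (c : Char) (t : List Char) :
    t.dropWhile (fun d => d == c) = t.drop (lcount c t) := by
  induction t with
  | nil => simp
  | cons d t ih =>
    rw [List.dropWhile_cons, lcount_cons]
    by_cases h : d = c <;> simp [h, ih]

theorem natsToInts_cons (x : Nat) (u : List Nat) :
    natsToInts (x :: u) = (x : Int) :: natsToInts u := rfl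

theorem natsToInts_concat (u : List Nat) (x : Nat) :
    natsToInts (u ++ [x]) = natsToInts u ++ [(x : Int)] := by simp [natsToInts]

theorem runsGo_eq (c : Char) (n : Nat) (t : List Char) :
    runsGo c n t = (n + lcount c t) :: runsSpec (t.dropWhile (fun d => d == c)) := by
  induction t generalizing c n with
  | nil => simp [runsGo, runsSpec, lcount]
  | cons d t ih =>
    rw [runsGo, lcount_cons, List.dropWhile_cons]
    by_cases h : d = c
    · subst h
      rw [if_pos rfl, if_pos rfl, ih, if_pos (by simp)]
      congr 1; omega
    · rw [if_neg h, if_neg h, if_neg (by simpa using h)]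
      simp [runsSpec]

theorem runsGo_replicate (a : Char) (q n : Nat) :
    runsGo a q (List.replicate n a) = [q + n] := by
  induction n generalizing q with
  | zero => simp [runsGo]
  | succ n ih => rw [List.replicate_succ, runsGo, if_pos rfl, ih]; congr 1; omega

theorem runsGo_append_replicate (a : Char) (n : Nat) :
    ∀ (u : List Char) (c : Char) (g : Nat), u.getLast?.getD c ≠ a →
      runsGo c g (u ++ List.replicate (n+1) a) = runsGo c g u ++ [(n+1)] := by
  intro u
  induction u with
  | nil =>
    intro c g h
    simp only [List.getLast?_nil, Option.getD_none] at h
    simp only [List.nil_append, List.replicate_succ, runsGo]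
    rw [if_neg (Ne.symm h), runsGo_replicate]
    simp [Nat.add_comm]
  | cons d u ih =>
    intro c g h
    simp only [List.cons_append, runsGo]
    have h' : u.getLast?.getD d ≠ a := by
      cases u with
      | nil => simpa using h
      | cons e u => simpa [List.getLast?_cons_cons] using h
    by_cases hdc : d = c
    · rw [if_pos hdc, if_pos hdc, ih d (g+1) h']
    · rw [if_neg hdc, if_neg hdc, ih d 1 h', List.cons_append]

theorem aScan_eq (l : List Char) :
    ∀ (t : List Char) (b : Nat) (c : Char), l[b-1]? = some c → l.drop b = t →
      aScan l b = b + lcount c t := by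
  intro t
  induction t with
  | nil =>
    intro b c _ hd
    have hb : l.length ≤ b := by simpa using (List.drop_eq_nil_iff).1 hd
    rw [aScan, if_neg (by omega)]
    simp [lcount]
  | cons d t ih =>
    intro b c hc hd
    have hb0 : (l.drop b)[0]? = some d := by rw [hd]; rfl
    have hbd : l[b]? = some d := by simpa [List.getElem?_drop] using hb0
    obtain ⟨hblt, -⟩ := List.getElem?_eq_some_iff.1 hbd
    have hd' : l.drop (b+1) = t := by
      have := congrArg (List.drop 1) hd
      simpa [List.drop_drop, Nat.add_comm] using this
    rw [aScan, lcount_cons]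
    by_cases hdc : d = c
    · rw [if_pos ⟨hblt, by rw [hbd, hc, hdc]⟩]
      rw [ih (b+1) d (by simpa using hbd) hd']
      rw [if_pos hdc, hdc]
      omega
    · have hcond : ¬(b < l.length ∧ l[b]? = l[b-1]?) := by
        rintro ⟨-, heq⟩
        rw [hbd, hc] at heq
        exact hdc (by simpa using heq)
      rw [if_neg hcond, if_neg hdc]
      omega

theorem aEnd_eq (l : List Char) :
    ∀ (k fuel : Nat) (e : Int), k < fuel →
      (∀ i : Nat, i < k → PySem.List.pyGet? l (e - i) = PySem.List.pyGet? l (e - i + 1)) →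
      PySem.List.pyGet? l (e - k) ≠ PySem.List.pyGet? l (e - k + 1) →
      aEnd l fuel e = e - k := by
  intro k
  induction k with
  | zero =>
    intro fuel e hf _ hne
    cases fuel with
    | zero => omega
    | succ f =>
      rw [aEnd, if_neg (by simpa using hne)]
      simp
  | succ k ih =>
    intro fuel e hf heq hne
    cases fuel with
    | zero => omega
    | succ f =>
      rw [aEnd, if_pos (by simpa using heq 0 (by omega))]
      rw [ih f (e-1) (by omega) (fun i hi => by
        have h := heq (i+1) (by omega)
        push_cast at h
        rw [show e - 1 - (i:Int) = e - ((i:Int)+1) from by ring]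
        exact h) (by
        push_cast at hne
        rw [show e - 1 - (k:Int) = e - ((k:Int)+1) from by ring]
        exact hne)]
      push_cast; ring

theorem aSeg_eq (l : List Char) (m : Nat) (hml : m < l.length) (hm : l[m]? ≠ l[m-1]?) :
    ∀ (d b : Nat) (acc : List Int), m - b = d → 1 ≤ b → b ≤ m →
      aSeg l b ((m:Int) - 1) acc
        = acc ++ natsToInts (runsSpec ((l.drop b).take (m - b))) := by
  intro d
  induction d using Nat.strong_induction_on with
  | _ d ih =>
    intro b acc hd hb1 hbm
    by_cases hbe : b = m
    · subst hbe
      rw [aSeg, if_neg (by omega)]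
      simp [runsSpec, natsToInts]
    · have hblt : b < m := by omega
      -- current char and its run
      obtain ⟨hbl, -⟩ : b < l.length ∧ True := ⟨by omega, trivial⟩
      have hcb : ∃ c, l[b]? = some c := ⟨l[b], List.getElem?_eq_some_iff.2 ⟨hbl, rfl⟩⟩
      obtain ⟨c, hc⟩ := hcb
      obtain ⟨k, hk⟩ : ∃ k, lcount c (l.drop (b+1)) = k := ⟨_, rfl⟩
      have hscan : aScan l (b+1) = (b+1) + k := by
        rw [aScan_eq l (l.drop (b+1)) (b+1) c (by simpa using hc) rfl, hk]
      -- elements of the run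
      have hrun : ∀ j : Nat, j < k → l[b+1+j]? = some c := by
        intro j hj
        have := (lcount_spec c (l.drop (b+1))).1 j (by omega)
        simpa [List.getElem?_drop] using this
      have hstop : l[b+1+k]? ≠ some c := by
        have := (lcount_spec c (l.drop (b+1))).2
        rw [hk] at this
        simpa [List.getElem?_drop] using this
      -- the run stops by m
      have hkm : b + 1 + k ≤ m := by
        by_contra hcon
        rw [not_le] at hcon
        -- then positions m and m-1 are inside the run (or at b), contradiction with hm
        have hmc : l[m]? = some c := by
          rcases Nat.lt_or_ge m (b+1) with h | h
          · omega
          · have := hrun (m - (b+1)) (by omega)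
            rwa [show b+1+(m-(b+1)) = m from by omega] at this
        have hm1c : l[m-1]? = some c := by
          rcases Nat.eq_or_lt_of_le (show b ≤ m - 1 from by omega) with h | h
          · rw [← h]; exact hc
          · have := hrun (m - 1 - (b+1)) (by omega)
            rwa [show b+1+(m-1-(b+1)) = m - 1 from by omega] at this
        exact hm (by rw [hmc, hm1c])
      have hi1 : b + 1 + k ≤ m := hkm
      -- boundary at the new position
      have hnew : l[b+1+k]? ≠ l[b+1+k-1]? := by
        have hprev : l[b+1+k-1]? = some c := by
          cases k with
          | zero => simpa using hc
          | succ k' =>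
            have := hrun k' (by omega)
            rwa [show b+1+k' = b+1+(k'+1)-1 from by omega] at this
        rw [hprev]; exact hstop
      rw [aSeg, if_pos (by omega), hscan]
      rw [ih (m - (b+1+k)) (by omega) (b+1+k) _ rfl (by omega) hi1]
      -- run decomposition of the window
      have hwin : (l.drop b).take (m - b) = c :: ((l.drop (b+1)).take (m - b - 1)) := by
        have : l.drop b = c :: l.drop (b+1) := by
          rw [List.drop_eq_getElem_cons hbl]
          congr 1
          obtain ⟨h1, h2⟩ := List.getElem?_eq_some_iff.1 hc
          exact h2
        rw [show m - b = (m - b - 1) + 1 from by omega, this, List.take_succ_cons]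
        simp
      have hkrest : lcount c ((l.drop (b+1)).take (m - b - 1)) = k := by
        rw [lcount_take, hk]
        omega
      have hdropw : ((l.drop (b+1)).take (m - b - 1)).dropWhile (fun d => d == c)
          = (l.drop (b+1+k)).take (m - (b+1+k)) := by
        rw [dropWhile_lcount, hkrest, List.drop_take, List.drop_drop]
        congr 1
        omega
      rw [hwin]
      rw [show runsSpec (c :: ((l.drop (b+1)).take (m - b - 1)))
            = runsGo c 1 ((l.drop (b+1)).take (m - b - 1)) from rfl]
      rw [runsGo_eq, hkrest, hdropw, natsToInts_cons, List.append_assoc]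
      rw [List.singleton_append]
      congr 2
      push_cast
      ring

theorem bRuns_go :
    ∀ (t : List Char) (rs : List Int) (n : Nat) (c : Char),
      (t.foldl bStep (rs ++ [(n : Int)], some c)).1
        = rs ++ natsToInts (runsGo c n t) := by
  intro t
  induction t with
  | nil => intro rs n c; simp [natsToInts, runsGo]
  | cons d t ih =>
    intro rs n c
    rw [List.foldl_cons]
    by_cases h : d = c
    · subst h
      rw [show bStep (rs ++ [(n : Int)], some d) d
            = (rs ++ [((n+1 : Nat) : Int)], some d) from by
          simp [bStep]]
      rw [ih, runsGo, if_pos rfl]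
    · rw [show bStep (rs ++ [(n : Int)], some c) d
            = ((rs ++ [(n : Int)]) ++ [((1:Nat) : Int)], some d) from by
          simp [bStep]
          exact fun hdc => h hdc.symm]
      rw [ih, runsGo, if_neg h, List.append_assoc]
      congr 1

theorem bRuns_eq (l : List Char) :
    (l.foldl bStep ([], none)).1 = natsToInts (runsSpec l) := by
  cases l with
  | nil => simp [natsToInts, runsSpec]
  | cons c t =>
    rw [List.foldl_cons]
    rw [show bStep ([], none) c = (([] : List Int) ++ [((1:Nat) : Int)], some c) from by
      simp [bStep]]
    rw [bRuns_go]
    simp [runsSpec]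

theorem slice_one_neg_one (xs : List Int) :
    PySem.List.slice xs (some 1) (some (-1)) = (xs.drop 1).dropLast := by
  cases xs with
  | nil => rfl
  | cons x t =>
    simp [PySem.List.slice, PySem.List.clampIdx, List.dropLast_eq_take]
    rw [if_neg (by omega)]
    omega

theorem bPre_go :
    ∀ (t : List Int) (acc : List Int) (v : Int),
      t.foldl (fun pre x => pre ++ [(pre.getLast?.getD 0) + x]) (acc ++ [v])
        = acc ++ v :: (List.range t.length).map (fun j => v + (t.take (j+1)).sum) := by
  intro t
  induction t with
  | nil => simp
  | cons d t ih =>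
    intro acc v
    rw [List.foldl_cons]
    rw [show acc ++ [v] ++ [(acc ++ [v]).getLast?.getD 0 + d] = (acc ++ [v]) ++ [v + d] from by simp]
    rw [ih]
    rw [List.length_cons, List.range_succ_eq_map]
    simp only [List.map_cons, List.map_map, List.append_assoc, List.cons_append,
      List.take_succ_cons, List.sum_cons]
    simp [Function.comp_def, add_assoc]

theorem bPre_eq (seg : List Int) :
    seg.foldl (fun pre x => pre ++ [(pre.getLast?.getD 0) + x]) [(0:Int)]
      = (List.range (seg.length + 1)).map (fun j => (seg.take j).sum) := by
  have h := bPre_go seg [] 0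
  simp only [List.nil_append] at h
  rw [h, List.range_succ_eq_map]
  simp only [List.map_cons, List.map_map, List.take_zero, List.sum_nil]
  congr 1
  apply List.map_congr_left
  intro j hj
  simp

theorem aFold (seg : List Int) (w : Int) (hw : 1 ≤ w) :
    ∀ (d : Nat) (i m : Int), w ≤ i → i + d = seg.length →
      (PySem.List.pyRange i (seg.length : Int) 1).foldl
        (fun (st : Int × Int) j =>
          let cur := st.1 + PySem.List.pyGetD seg j 0 - PySem.List.pyGetD seg (j - w) 0
          (cur, if cur < st.2 then cur else st.2))
        ((seg.take i.toNat).sum - (seg.take (i - w).toNat).sum, m)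
      = ((seg.take seg.length).sum - (seg.take ((seg.length : Int) - w).toNat).sum,
         ((PySem.List.pyRange (i+1) ((seg.length : Int) + 1) 1).map
            (fun j => (seg.take j.toNat).sum - (seg.take (j - w).toNat).sum)).foldl min m) := by
  intro d
  induction d with
  | zero =>
    intro i m hwi hlen
    rw [show i = (seg.length : Int) from by omega]
    rw [PySem.List.pyRange_one_eq_nil (by omega), PySem.List.pyRange_one_eq_nil (by omega)]
    simp
  | succ d ih =>
    intro i m hwi hlen
    have hi0 : 0 ≤ i := by omega
    have hin : i < (seg.length : Int) := by omega
    rw [PySem.List.pyRange_one_cons hin, List.foldl_cons]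
    have hgi : PySem.List.pyGetD seg i 0 = seg[i.toNat]'(by omega) := by
      rw [PySem.List.pyGetD_eq_getElem] <;> omega
    have hgiw : PySem.List.pyGetD seg (i - w) 0 = seg[(i-w).toNat]'(by omega) := by
      rw [PySem.List.pyGetD_eq_getElem] <;> omega
    have hcur : (seg.take i.toNat).sum - (seg.take (i - w).toNat).sum
          + PySem.List.pyGetD seg i 0 - PySem.List.pyGetD seg (i - w) 0
        = (seg.take (i+1).toNat).sum - (seg.take (i + 1 - w).toNat).sum := by
      rw [hgi, hgiw]
      rw [show (i+1).toNat = i.toNat + 1 from by omega,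
          show (i+1-w).toNat = (i-w).toNat + 1 from by omega]
      rw [List.sum_take_succ seg i.toNat (by omega), List.sum_take_succ seg (i-w).toNat (by omega)]
      ring
    simp only []
    rw [hcur]
    rw [show (if (seg.take (i+1).toNat).sum - (seg.take (i + 1 - w).toNat).sum < m
          then (seg.take (i+1).toNat).sum - (seg.take (i + 1 - w).toNat).sum else m)
        = min m ((seg.take (i+1).toNat).sum - (seg.take (i + 1 - w).toNat).sum) from by
      rw [min_def]; split_ifs <;> omega]
    rw [ih (i+1) _ (by omega) (by omega)]
    congr 1
    conv_rhs => rw [PySem.List.pyRange_one_cons (show i+1 < (seg.length:Int)+1 by omega)]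
    rw [List.map_cons, List.foldl_cons]

theorem phase2 (seg : List Int) (p : Int) (hp : 0 ≤ p) :
    (if p > PySem.Int.floordiv ((seg.length : Int) - 1) 2 then 0
     else
      let width := (seg.length : Int) - 2 * p
      let m0 := (PySem.List.slice seg (some 0) (some width)).sum
      ((PySem.List.pyRange width (seg.length : Int) 1).foldl
        (fun (st : Int × Int) i =>
          let cur := st.1 + PySem.List.pyGetD seg i 0 - PySem.List.pyGetD seg (i - width) 0
          (cur, if cur < st.2 then cur else st.2)) (m0, m0)).2)
    = (if p > PySem.Int.floordiv ((seg.length : Int) - 1) 2 then 0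
       else
        let width := (seg.length : Int) - 2 * p
        let pre := seg.foldl (fun pre x => pre ++ [(pre.getLast?.getD 0) + x]) [(0:Int)]
        (PySem.List.min? ((PySem.List.pyRange width ((seg.length : Int) + 1) 1).map
            (fun j => PySem.List.pyGetD pre j 0 - PySem.List.pyGetD pre (j - width) 0))
          (fun x => x)).getD 0) := by
  by_cases hg : p > PySem.Int.floordiv ((seg.length : Int) - 1) 2
  · rw [if_pos hg, if_pos hg]
  · rw [if_neg hg, if_neg hg]
    simp only []
    set n : Int := (seg.length : Int) with hn
    set w : Int := n - 2 * p with hwdef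
    have hple : p * 2 ≤ n - 1 := by
      rw [← PySem.Int.le_floordiv_iff_mul_le (by omega)]
      omega
    have hw1 : 1 ≤ w := by omega
    have hwn : w ≤ n := by omega
    -- T j, the window sum ending at j
    have hpre : seg.foldl (fun pre x => pre ++ [(pre.getLast?.getD 0) + x]) [(0:Int)]
        = (List.range (seg.length + 1)).map (fun j => (seg.take j).sum) := bPre_eq seg
    have hget : ∀ j : Int, 0 ≤ j → j ≤ n →
        PySem.List.pyGetD ((List.range (seg.length + 1)).map (fun j => (seg.take j).sum)) j 0
          = (seg.take j.toNat).sum := by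
      intro j h0 hjn
      rw [PySem.List.pyGetD_eq_getElem]
      · rw [List.getElem_map, List.getElem_range]
      · exact h0
      · simp; omega
    -- rewrite B's mapped list into window sums
    have hmap : (PySem.List.pyRange w (n + 1) 1).map
          (fun j => PySem.List.pyGetD ((List.range (seg.length + 1)).map (fun j => (seg.take j).sum)) j 0
            - PySem.List.pyGetD ((List.range (seg.length + 1)).map (fun j => (seg.take j).sum)) (j - w) 0)
        = (PySem.List.pyRange w (n + 1) 1).map
            (fun j => (seg.take j.toNat).sum - (seg.take (j - w).toNat).sum) := by
      apply List.map_congr_left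
      intro j hj
      rw [PySem.List.mem_pyRange_one] at hj
      rw [hget j (by omega) (by omega), hget (j - w) (by omega) (by omega)]
    -- A's m0 is the first window sum
    have hm0 : (PySem.List.slice seg (some 0) (some w)).sum = (seg.take w.toNat).sum := by
      rw [PySem.List.slice_toNat seg (by omega) (by omega)]
      simp
    have hm0T : (seg.take w.toNat).sum
        = (seg.take w.toNat).sum - (seg.take (w - w).toNat).sum := by
      simp
    rw [hpre, hmap, hm0]
    -- evaluate A's fold
    have hA := aFold seg w hw1 (n - w).toNat w ((seg.take w.toNat).sum) (le_refl w) (by omega)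
    rw [show ((seg.take w.toNat).sum - (seg.take (w - w).toNat).sum) = (seg.take w.toNat).sum from by simp] at hA
    rw [← hn] at hA
    rw [hA]
    -- evaluate B's min
    conv_rhs => rw [PySem.List.pyRange_one_cons (show w < n + 1 by omega), List.map_cons,
      PySem.List.min?_id_cons]
    simp only [Option.getD_some]
    rw [show w - w = 0 from by ring]
    simp

theorem runsSpec_cons_eq (c : Char) (t : List Char) :
    runsSpec (c :: t) = (1 + lcount c t) :: runsSpec ((c :: t).drop (1 + lcount c t)) := by
  show runsGo c 1 t = _
  rw [runsGo_eq, dropWhile_lcount]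
  congr 2
  simp [Nat.add_comm]

theorem aScan_one (c : Char) (t : List Char) : aScan (c :: t) 1 = 1 + lcount c t := by
  exact aScan_eq (c :: t) t 1 c (by simp) (by simp)

theorem lead_spec (c : Char) (t : List Char) :
    ∀ j : Nat, j < 1 + lcount c t → (c :: t)[j]? = some c := by
  intro j hj
  cases j with
  | zero => simp
  | succ i => simpa using (lcount_spec c t).1 i (by omega)

theorem allcase (l : List Char) (hl : l ≠ []) (hall : aScan l 1 = l.length) :
    PySem.List.slice (natsToInts (runsSpec l)) (some 1) (some (-1)) = [] := by
  obtain ⟨c, t, rfl⟩ : ∃ c t, l = c :: t := by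
    cases l with
    | nil => exact absurd rfl hl
    | cons c t => exact ⟨c, t, rfl⟩
  rw [aScan_one] at hall
  simp only [List.length_cons] at hall
  have hlc : lcount c t = t.length := by omega
  rw [runsSpec_cons_eq, show 1 + lcount c t = (c :: t).length from by simp; omega]
  rw [List.drop_length]
  rw [slice_one_neg_one]
  simp [runsSpec, natsToInts]

theorem seg_agree (l : List Char) (hl : l ≠ []) (hne : aScan l 1 ≠ l.length) :
    aSeg l (aScan l 1) (aEnd l l.length ((l.length : Int) - 2)) []
      = PySem.List.slice (natsToInts (runsSpec l)) (some 1) (some (-1)) := by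
  obtain ⟨c, t, hlct⟩ : ∃ c t, l = c :: t := by
    cases l with
    | nil => exact absurd rfl hl
    | cons c t => exact ⟨c, t, rfl⟩
  obtain ⟨c', t', hr⟩ : ∃ c' t', l.reverse = c' :: t' := by
    cases hrev : l.reverse with
    | nil => exact absurd (by simpa using congrArg List.length hrev) (by simp [hlct])
    | cons a u => exact ⟨a, u, rfl⟩
  have hlen : l.length = t.length + 1 := by simp [hlct]
  have hlent' : t'.length = t.length := by
    have := congrArg List.length hr
    simp at this
    omega
  -- the first-run length f
  have hf : aScan l 1 = 1 + lcount c t := by rw [hlct, aScan_one]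
  set f : Nat := 1 + lcount c t with hfdef
  have hfle : f ≤ l.length := by
    have := lcount_le c t
    omega
  have hflt : f < l.length := by
    rcases Nat.lt_or_ge f l.length with h | h
    · exact h
    · exact absurd (by omega : f = l.length) (hf ▸ hne)
  -- leading run elements
  have hlead : ∀ j : Nat, j < f → l[j]? = some c := by
    intro j hj
    rw [hlct]; exact lead_spec c t j hj
  -- trailing run length k'
  set k' : Nat := lcount c' t' with hkdef
  have hrget : ∀ i : Nat, i < l.length → l[l.length - 1 - i]? = l.reverse[i]? := by
    intro i hi
    rw [List.getElem?_reverse (by simpa using hi)]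
  have htrail : ∀ i : Nat, i ≤ k' → k' < l.length → l[l.length - 1 - i]? = some c' := by
    intro i hik hkl
    rw [hrget i (by have := lcount_le c' t'; omega), hr]
    cases i with
    | zero => simp
    | succ j => simpa using (lcount_spec c' t').1 j (by omega)
  -- all-equal is excluded
  have hkne : k' ≠ t'.length := by
    intro hkeq
    have hallt' : ∀ x ∈ t', x = c' := (lcount_eq_length_iff c' t').1 hkeq
    have halll : ∀ x ∈ l, x = c' := by
      intro x hx
      have : x ∈ l.reverse := by simpa using hx
      rw [hr] at this
      rcases List.mem_cons.1 this with h | h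
      · exact h
      · exact hallt' x h
    have hcc : c = c' := halll c (by simp [hlct])
    have : lcount c t = t.length := by
      apply (lcount_eq_length_iff c t).2
      intro x hx
      rw [halll x (by simp [hlct, hx]), hcc]
    omega
  have hkt : k' < t'.length := Nat.lt_of_le_of_ne (lcount_le c' t') hkne
  have hlen2 : 2 ≤ l.length := by omega
  -- the boundary before the trailing run
  have hstop' : l[l.length - 2 - k']? ≠ some c' := by
    have h1 : l.reverse[k'+1]? = t'[k']? := by rw [hr]; simp
    have h2 : t'[k']? ≠ some c' := (lcount_spec c' t').2
    have h3 : l[l.length - 1 - (k'+1)]? = l.reverse[k'+1]? := hrget (k'+1) (by omega)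
    rw [show l.length - 2 - k' = l.length - 1 - (k'+1) from by omega, h3, h1]
    exact h2
  -- evaluate aEnd
  have hend : aEnd l l.length ((l.length : Int) - 2) = (l.length : Int) - 2 - k' := by
    have := aEnd_eq l k' l.length ((l.length : Int) - 2) (by omega)
      (fun i hi => by
        have e1 : (l.length : Int) - 2 - i = ((l.length - 2 - i : Nat) : Int) := by omega
        have e2 : ((l.length - 2 - i : Nat) : Int) + 1 = ((l.length - 1 - i : Nat) : Int) := by omega
        rw [e1, e2, PySem.List.pyGet?_natCast, PySem.List.pyGet?_natCast]
        rw [show l.length - 2 - i = l.length - 1 - (i+1) from by omega]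
        rw [htrail (i+1) (by omega) (by omega), htrail i (by omega) (by omega)])
      (by
        have e1 : (l.length : Int) - 2 - k' = ((l.length - 2 - k' : Nat) : Int) := by omega
        have e2 : ((l.length - 2 - k' : Nat) : Int) + 1 = ((l.length - 1 - k' : Nat) : Int) := by omega
        rw [e1, e2, PySem.List.pyGet?_natCast, PySem.List.pyGet?_natCast]
        rw [htrail k' (le_refl k') (by omega)]
        intro hcon
        exact hstop' hcon)
    rw [this]
  -- the end index as a Nat
  set m : Nat := l.length - 1 - k' with hmdef
  have hm1 : 1 ≤ m := by omega
  have hmlen : m < l.length := by omega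
  have hlm : l[m]? = some c' := by
    rw [hmdef]; exact htrail k' (le_refl k') (by omega)
  have hlm1 : l[m-1]? ≠ some c' := by
    rw [show m - 1 = l.length - 2 - k' from by omega]
    exact hstop'
  have hmbound : l[m]? ≠ l[m-1]? := by
    rw [hlm]
    intro heq
    exact hlm1 heq.symm
  -- the first run ends before the trailing run starts
  have hfm : f ≤ m := by
    by_contra hcon
    rw [not_le] at hcon
    have h1 : l[m]? = some c := hlead m (by omega)
    have hcc : c = c' := by
      rw [hlm] at h1
      simpa using h1.symm
    have h2 : l[m-1]? = some c := hlead (m-1) (by omega)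
    exact hlm1 (by rw [h2, hcc])
  -- evaluate the A side
  rw [hf, hend, show (l.length : Int) - 2 - k' = (m : Int) - 1 from by omega]
  rw [aSeg_eq l m hmlen hmbound (m - f) f [] rfl (by omega) hfm, List.nil_append]
  -- decompose the tail of the list into window ++ trailing run
  have hdropm : l.drop m = List.replicate (k'+1) c' := by
    rw [List.eq_replicate_iff]
    refine ⟨by simp; omega, ?_⟩
    intro x hx
    obtain ⟨j, hj, hxj⟩ := List.getElem_of_mem hx
    have hjlt : j < k' + 1 := by
      have := hj; simp at this; omega
    have : l[m + j]? = some x := by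
      rw [← List.getElem?_drop]
      exact List.getElem?_eq_some_iff.2 ⟨hj, hxj⟩
    have h2 : l[l.length - 1 - (k' - j)]? = some c' := htrail (k' - j) (by omega) (by omega)
    rw [show l.length - 1 - (k' - j) = m + j from by omega] at h2
    rw [this] at h2
    simpa using h2
  have hdecomp : l.drop f = (l.drop f).take (m - f) ++ List.replicate (k'+1) c' := by
    conv_lhs => rw [← List.take_append_drop (m - f) (l.drop f)]
    congr 1
    rw [List.drop_drop, show f + (m - f) = m from by omega, hdropm]
  -- runsSpec of the tail ends with the trailing run
  have hruns_tail : runsSpec (l.drop f) = runsSpec ((l.drop f).take (m - f)) ++ [k'+1] := by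
    have hWlen : ((l.drop f).take (m - f)).length = m - f := by
      rw [List.length_take, List.length_drop]; omega
    conv_lhs => rw [hdecomp]
    cases hW : (l.drop f).take (m - f) with
    | nil =>
      rw [List.nil_append, List.replicate_succ]
      show runsGo c' 1 (List.replicate k' c') = runsSpec [] ++ [k'+1]
      rw [runsGo_replicate]
      show [1 + k'] = [] ++ [k'+1]
      rw [List.nil_append, Nat.add_comm]
    | cons w0 W' =>
      have hlen' : W'.length + 1 = m - f := by
        rw [← hWlen, hW]; simp
      have hWlast : (w0 :: W').getLast? = l[m-1]? := by
        rw [← hW, List.getLast?_eq_getElem?, hWlen]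
        rw [List.getElem?_take_of_lt (by omega), List.getElem?_drop]
        congr 1
        omega
      obtain ⟨g, hg⟩ : ∃ g, l[m-1]? = some g :=
        ⟨l[m-1]'(by omega), List.getElem?_eq_some_iff.2 ⟨by omega, rfl⟩⟩
      have hgne : g ≠ c' := fun hgc => hlm1 (hgc ▸ hg)
      rw [List.cons_append]
      show runsGo w0 1 (W' ++ List.replicate (k'+1) c') = runsSpec (w0 :: W') ++ [k'+1]
      rw [runsGo_append_replicate c' k' W' w0 1 ?_]
      · rfl
      · rw [List.getLast?_cons, hg] at hWlast
        have hval : W'.getLast?.getD w0 = g := by simpa using hWlast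
        rw [hval]
        exact hgne
  -- evaluate the B side
  rw [slice_one_neg_one]
  rw [hlct, runsSpec_cons_eq, ← hlct]
  rw [show (1 + lcount c t) = f from rfl]
  rw [natsToInts_cons, List.drop_one, List.tail_cons]
  rw [hruns_tail, natsToInts_concat, List.dropLast_concat]

-- ===== VERDICT (by name: the statement is the Claim_ definition above) =====
theorem minStringCoeff_spec : Claim_equal_minStringCoeff := by
  intro s p _ hpre
  obtain ⟨hs, hp⟩ := hpre
  unfold Spec_minStringCoeff minStringCoeff minStringCoeff_alt
  simp only [bRuns_eq]
  by_cases hall : aScan s.toList 1 = s.toList.length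
  · simp only [if_pos hall, allcase s.toList hs hall]
    have h1 : PySem.Int.floordiv ((0:Int) - 1) 2 = -1 := by decide
    have h2 : (-1:Int) < p := by omega
    simp [h2]
  · simp only [if_neg hall, seg_agree s.toList hs hall]
    exact phase2 (PySem.List.slice (natsToInts (runsSpec s.toList)) (some 1) (some (-1))) p hp
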